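-- pv_equiv track=rewrite | github.com/PedroSanchesAgatti/ProjetoIntegrador01 | criptografia.py | descriptografia
-- ===== SOURCE A (Python) =====
-- def multiplicacao_matrizes(matrix_1, matrix_2):
--     resultado = []
--     for i in range(len(matrix_1)):
--         linha = []
--         for j in range(len(matrix_2[0])):
--             soma = 0
--             for k in range(len(matrix_1[0])):
--                 soma += matrix_1[i][k] * matrix_2[k][j]
--             linha.append(soma)
--         resultado.append(linha)
--
--     return resultado
--
-- def descriptografia(palavra):
--     lista = ["A","B","C","D","E","F","G","H","I","J","K","L","M","N","O","P","Q","R","S","T","U","V","W","X","Y","Z","0","1","2","3","4","5","6","7","8","9"]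
--     chave = [[58, -87], [-29, 116]]
--     x = [[], []]
--     cont = 0
--     par=True
--     if len(palavra) % 2 == 1:
--         palavra =palavra[:-1]
--         par=False
--     for letra in palavra:
--         if cont % 2 == 0:
--             x[0].append(lista.index(letra))
--         else:
--             x[1].append(lista.index(letra))
--         cont += 1
--     matrix=multiplicacao_matrizes(chave,x)
--     matrix=[[x%36 for x in row]for row in matrix]
--     resultado=""
--     for j in range(len(matrix[0])):
--         resultado+=lista[matrix[0][j]]
--         resultado+=lista[matrix[1][j]]
--     if par==False:
--         resultado=resultado[:-1]
--     return resultado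
-- ===== SOURCE B (Python) =====
-- def descriptografia(palavra):
--     lista = ["A","B","C","D","E","F","G","H","I","J","K","L","M","N","O","P","Q","R","S","T","U","V","W","X","Y","Z","0","1","2","3","4","5","6","7","8","9"]
--     impar = len(palavra) % 2 == 1
--     if impar:
--         palavra = palavra[:-1]
--     saida = []
--     it = iter(palavra)
--     for a, b in zip(it, it):
--         ia = lista.index(a)
--         ib = lista.index(b)
--         saida.append(lista[(58 * ia - 87 * ib) % 36])
--         saida.append(lista[(-29 * ia + 116 * ib) % 36])
--     resultado = "".join(saida)
--     if impar:
--         resultado = resultado[:-1]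
--     return resultado
-- ===== Notes on version B (the rewrite author's own statement) =====
-- stated objective: simpler
-- what changed: Drops the generic 3-nested matrix-multiplication helper and the two-row split/reassemble: B makes one linear pass over consecutive character pairs, computing the two output indices per pair with closed-form arithmetic (58*ia-87*ib)%36 and (-29*ia+116*ib)%36.
import Mathlib
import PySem

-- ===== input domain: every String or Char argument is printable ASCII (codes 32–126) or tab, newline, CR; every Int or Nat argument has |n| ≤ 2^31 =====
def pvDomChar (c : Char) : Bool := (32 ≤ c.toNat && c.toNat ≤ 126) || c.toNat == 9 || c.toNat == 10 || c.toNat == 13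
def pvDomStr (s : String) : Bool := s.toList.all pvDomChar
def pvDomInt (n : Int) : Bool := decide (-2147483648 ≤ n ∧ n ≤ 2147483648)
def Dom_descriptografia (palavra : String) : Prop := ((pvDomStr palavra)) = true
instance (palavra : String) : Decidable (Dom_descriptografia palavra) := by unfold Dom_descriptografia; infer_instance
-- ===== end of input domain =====

-- B replaces A's generic matrix-multiplication helper and two-row split/reassemble by a single
-- pass over consecutive character pairs with closed-form per-pair arithmetic (objective: simpler).

-- shared alphabet (Python's `lista` of one-character strings, as chars) and its two lookups
def pvLista : List Char :=
  ['A','B','C','D','E','F','G','H','I','J','K','L','M','N','O','P','Q','R','S','T','U','V','W','X','Y','Z','0','1','2','3','4','5','6','7','8','9']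

-- lista.index(c); Python raises ValueError when c ∉ lista — exactly those inputs are outside Pre_
def pvIdx (c : Char) : Int := ((PySem.List.index? pvLista c).getD 0 : Nat)

-- lista[i] for 0 ≤ i < 36 (the argument is always taken % 36); the default is never reached
def pvAt (i : Int) : Char := PySem.List.pyGetD pvLista i ' '

-- ===== PORT A =====
def multiplicacao_matrizes (m1 m2 : List (List Int)) : List (List Int) :=
  (PySem.List.pyRange 0 (m1.length : Int) 1).foldl (fun resultado i =>
    resultado ++ [(PySem.List.pyRange 0 (((PySem.List.pyGetD m2 0 []).length : Int)) 1).foldl (fun linha j =>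
      linha ++ [(PySem.List.pyRange 0 (((PySem.List.pyGetD m1 0 []).length : Int)) 1).foldl (fun soma k =>
        soma + PySem.List.pyGetD (PySem.List.pyGetD m1 i []) k 0 *
               PySem.List.pyGetD (PySem.List.pyGetD m2 k []) j 0) 0]) []]) []

def descriptografia (palavra : String) : String :=
  let chave : List (List Int) := [[58, -87], [-29, 116]]
  let t : List Char × Bool :=
    if PySem.Int.mod (palavra.toList.length : Int) 2 == 1 then
      (PySem.List.slice palavra.toList none (some (-1)), false)
    else (palavra.toList, true)
  let st := t.1.foldl (fun (st : List Int × List Int × Int) letra =>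
      if PySem.Int.mod st.2.2 2 == 0 then (st.1 ++ [pvIdx letra], st.2.1, st.2.2 + 1)
      else (st.1, st.2.1 ++ [pvIdx letra], st.2.2 + 1)) ([], [], 0)
  let matrix := multiplicacao_matrizes chave [st.1, st.2.1]
  let matrix := matrix.map (fun row => row.map (fun x => PySem.Int.mod x 36))
  let resultado := (PySem.List.pyRange 0 (((PySem.List.pyGetD matrix 0 []).length : Int)) 1).foldl
      (fun acc j =>
        acc ++ [pvAt (PySem.List.pyGetD (PySem.List.pyGetD matrix 0 []) j 0)]
            ++ [pvAt (PySem.List.pyGetD (PySem.List.pyGetD matrix 1 []) j 0)]) []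
  let resultado := if t.2 == false then PySem.List.slice resultado none (some (-1)) else resultado
  String.ofList resultado

-- ===== PORT B =====
-- zip(it, it) over one iterator: consecutive pairs
def pvPairs : List Char → List (Char × Char)
  | a :: b :: r => (a, b) :: pvPairs r
  | _ => []

def descriptografia_alt (palavra : String) : String :=
  let impar := palavra.toList.length % 2 == 1
  let s := if impar then palavra.toList.dropLast else palavra.toList
  let saida := (pvPairs s).foldl (fun acc q =>
      acc ++ [pvAt (PySem.Int.mod (58 * pvIdx q.1 - 87 * pvIdx q.2) 36),
              pvAt (PySem.Int.mod (-29 * pvIdx q.1 + 116 * pvIdx q.2) 36)]) []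
  let resultado := if impar then saida.dropLast else saida
  String.ofList resultado

-- ===== PRECONDITION & SPEC =====
-- Pre_ excludes exactly the inputs on which A raises ValueError: a character outside the
-- 36-symbol alphabet among the characters actually looked up (the last character of an
-- odd-length input is trimmed before any lookup, so it may be anything).
def Pre_descriptografia (palavra : String) : Prop :=
  ((if palavra.toList.length % 2 == 1 then palavra.toList.dropLast else palavra.toList).all
    (fun c => pvLista.contains c)) = true
instance (palavra : String) : Decidable (Pre_descriptografia palavra) := by
  unfold Pre_descriptografia; infer_instance

def pvWitness_descriptografia : String := "HELLO1"

def Spec_descriptografia (palavra : String) (out : String) : Prop := out = descriptografia_alt palavra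
instance (palavra : String) (out : String) : Decidable (Spec_descriptografia palavra out) := by
  unfold Spec_descriptografia; infer_instance

-- ===== CLAIM (what is proved, stated in full; the proofs are below) =====
def Claim_equal_descriptografia : Prop := ∀ (palavra : String), Dom_descriptografia palavra → Pre_descriptografia palavra → Spec_descriptografia palavra (descriptografia palavra)

-- ===== LEMMAS AND PROOFS =====

theorem pvFlattenSingleton {α β : Type} (l : List α) (f : α → β) :
    (l.map (fun x => [f x])).flatten = l.map f := by
  induction l with
  | nil => rfl
  | cons a t ih => simp [ih]

theorem pvMatmul (x0 x1 : List Int) :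
    multiplicacao_matrizes [[58,-87],[-29,116]] [x0, x1] =
    [(PySem.List.pyRange 0 (x0.length : Int) 1).map
        (fun j => 0 + 58 * PySem.List.pyGetD x0 j 0 + -87 * PySem.List.pyGetD x1 j 0),
     (PySem.List.pyRange 0 (x0.length : Int) 1).map
        (fun j => 0 + -29 * PySem.List.pyGetD x0 j 0 + 116 * PySem.List.pyGetD x1 j 0)] := by
  have h2 : PySem.List.pyRange 0 2 1 = [0, 1] := by decide
  simp only [multiplicacao_matrizes, List.length_cons, List.length_nil]
  norm_num [h2, PySem.List.pyGetD, PySem.List.pyIdx?, PySem.List.foldl_append_singleton_eq_map, pvFlattenSingleton]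

def pvEo : List Char → List Char × List Char
  | [] => ([], [])
  | a :: r => (a :: (pvEo r).2, (pvEo r).1)

theorem pvFold_spec (l : List Char) : ∀ (x0 x1 : List Int) (c : Int), 0 ≤ c →
    (PySem.Int.mod c 2 = 0 →
      l.foldl (fun (st : List Int × List Int × Int) letra =>
          if PySem.Int.mod st.2.2 2 == 0 then (st.1 ++ [pvIdx letra], st.2.1, st.2.2 + 1)
          else (st.1, st.2.1 ++ [pvIdx letra], st.2.2 + 1)) (x0, x1, c)
        = (x0 ++ (pvEo l).1.map pvIdx, x1 ++ (pvEo l).2.map pvIdx, c + l.length)) ∧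
    (PySem.Int.mod c 2 = 1 →
      l.foldl (fun (st : List Int × List Int × Int) letra =>
          if PySem.Int.mod st.2.2 2 == 0 then (st.1 ++ [pvIdx letra], st.2.1, st.2.2 + 1)
          else (st.1, st.2.1 ++ [pvIdx letra], st.2.2 + 1)) (x0, x1, c)
        = (x0 ++ (pvEo l).2.map pvIdx, x1 ++ (pvEo l).1.map pvIdx, c + l.length)) := by
  induction l with
  | nil => intro x0 x1 c hc; constructor <;> intro h <;> simp [pvEo]
  | cons a r ih =>
    intro x0 x1 c hc
    have hme : PySem.Int.mod c 2 = c % 2 := PySem.Int.mod_eq_emod_of_pos (by omega)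
    have hme1 : PySem.Int.mod (c + 1) 2 = (c + 1) % 2 := PySem.Int.mod_eq_emod_of_pos (by omega)
    constructor <;> intro h
    · have hstep : PySem.Int.mod (c + 1) 2 = 1 := by omega
      simp only [List.foldl_cons, h, beq_self_eq_true, if_pos]
      rw [(ih (x0 ++ [pvIdx a]) x1 (c + 1) (by omega)).2 hstep]
      simp [pvEo, List.append_assoc, List.length_cons]
      ring
    · have hstep : PySem.Int.mod (c + 1) 2 = 0 := by omega
      have hne : (PySem.Int.mod c 2 == 0) = false := by rw [h]; decide
      simp only [List.foldl_cons, hne, if_false, Bool.false_eq_true]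
      rw [(ih x0 (x1 ++ [pvIdx a]) (c + 1) (by omega)).1 hstep]
      simp [pvEo, List.append_assoc, List.length_cons]
      ring

theorem pvFlat (F G : Int → Int → Char) (x0 x1 : List Int) (h : x0.length = x1.length) :
    (PySem.List.pyRange 0 (x0.length : Int) 1).flatMap
      (fun j => [F (PySem.List.pyGetD x0 j 0) (PySem.List.pyGetD x1 j 0),
                 G (PySem.List.pyGetD x0 j 0) (PySem.List.pyGetD x1 j 0)])
    = (x0.zip x1).flatMap (fun p => [F p.1 p.2, G p.1 p.2]) := by
  rw [List.flatMap_def, List.flatMap_def]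
  congr 1
  apply List.ext_getElem
  · simp [h]
  · intro k hk1 hk2
    have hkn : k < x0.length := by simp at hk1; omega
    have hkn1 : k < x1.length := by omega
    simp only [List.getElem_map, PySem.List.getElem_pyRange_one, List.getElem_zip]
    have e0 : PySem.List.pyGetD x0 ((0 : Int) + k) 0 = x0[k] := by
      have : ((0 : Int) + k) = (k : Int) := by omega
      rw [this, PySem.List.pyGetD_natCast, List.getD_eq_getElem _ _ hkn]
    have e1 : PySem.List.pyGetD x1 ((0 : Int) + k) 0 = x1[k] := by
      have : ((0 : Int) + k) = (k : Int) := by omega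
      rw [this, PySem.List.pyGetD_natCast, List.getD_eq_getElem _ _ hkn1]
    rw [e0, e1]

theorem pvPairs_eq_zip : ∀ s : List Char, pvPairs s = (pvEo s).1.zip (pvEo s).2 := by
  intro s
  induction s using pvPairs.induct with
  | case1 a b r ih => simp [pvPairs, pvEo, ih]
  | case2 s h =>
    rcases s with _ | ⟨a, _ | ⟨b, r⟩⟩
    · simp [pvPairs, pvEo]
    · simp [pvPairs, pvEo]
    · exact absurd rfl (h a b r)

theorem pvEo_len : ∀ s : List Char, s.length % 2 = 0 → (pvEo s).1.length = (pvEo s).2.length := by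
  intro s
  induction s using pvPairs.induct with
  | case1 a b r ih => intro h; simp only [List.length_cons] at h; simpa [pvEo] using ih (by omega)
  | case2 s h =>
    rcases s with _ | ⟨a, _ | ⟨b, r⟩⟩
    · intro _; rfl
    · intro h; simp at h
    · exact absurd rfl (h a b r)

theorem pvCore (p : List Char) (hev : p.length % 2 = 0) :
    List.foldl (fun acc j =>
        acc ++ [pvAt (PySem.List.pyGetD (PySem.List.pyGetD (List.map (fun row => List.map (fun x => PySem.Int.mod x 36) row)
        (multiplicacao_matrizes [[58, -87], [-29, 116]]
          [(List.foldl (fun (st : List Int × List Int × Int) letra =>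
          if PySem.Int.mod st.2.2 2 == 0 then (st.1 ++ [pvIdx letra], st.2.1, st.2.2 + 1)
          else (st.1, st.2.1 ++ [pvIdx letra], st.2.2 + 1)) ([], [], 0) p).1,
           (List.foldl (fun (st : List Int × List Int × Int) letra =>
          if PySem.Int.mod st.2.2 2 == 0 then (st.1 ++ [pvIdx letra], st.2.1, st.2.2 + 1)
          else (st.1, st.2.1 ++ [pvIdx letra], st.2.2 + 1)) ([], [], 0) p).2.1])) 0 []) j 0)]
            ++ [pvAt (PySem.List.pyGetD (PySem.List.pyGetD (List.map (fun row => List.map (fun x => PySem.Int.mod x 36) row)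
        (multiplicacao_matrizes [[58, -87], [-29, 116]]
          [(List.foldl (fun (st : List Int × List Int × Int) letra =>
          if PySem.Int.mod st.2.2 2 == 0 then (st.1 ++ [pvIdx letra], st.2.1, st.2.2 + 1)
          else (st.1, st.2.1 ++ [pvIdx letra], st.2.2 + 1)) ([], [], 0) p).1,
           (List.foldl (fun (st : List Int × List Int × Int) letra =>
          if PySem.Int.mod st.2.2 2 == 0 then (st.1 ++ [pvIdx letra], st.2.1, st.2.2 + 1)
          else (st.1, st.2.1 ++ [pvIdx letra], st.2.2 + 1)) ([], [], 0) p).2.1])) 1 []) j 0)]) []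
      (PySem.List.pyRange 0 (((PySem.List.pyGetD (List.map (fun row => List.map (fun x => PySem.Int.mod x 36) row)
        (multiplicacao_matrizes [[58, -87], [-29, 116]]
          [(List.foldl (fun (st : List Int × List Int × Int) letra =>
          if PySem.Int.mod st.2.2 2 == 0 then (st.1 ++ [pvIdx letra], st.2.1, st.2.2 + 1)
          else (st.1, st.2.1 ++ [pvIdx letra], st.2.2 + 1)) ([], [], 0) p).1,
           (List.foldl (fun (st : List Int × List Int × Int) letra =>
          if PySem.Int.mod st.2.2 2 == 0 then (st.1 ++ [pvIdx letra], st.2.1, st.2.2 + 1)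
          else (st.1, st.2.1 ++ [pvIdx letra], st.2.2 + 1)) ([], [], 0) p).2.1])) 0 []).length : Int)) 1)
    = List.foldl (fun acc q =>
        acc ++ [pvAt (PySem.Int.mod (58 * pvIdx q.1 - 87 * pvIdx q.2) 36),
                pvAt (PySem.Int.mod (-29 * pvIdx q.1 + 116 * pvIdx q.2) 36)]) [] (pvPairs p) := by
  have hfold := (pvFold_spec p [] [] 0 le_rfl).1 (by decide)
  simp only [List.nil_append] at hfold
  set x0 : List Int := (pvEo p).1.map pvIdx with hx0
  set x1 : List Int := (pvEo p).2.map pvIdx with hx1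
  have hlen : x0.length = x1.length := by simp [hx0, hx1, pvEo_len p hev]
  simp only [hfold, pvMatmul, List.map_map, List.map_cons, List.map_nil]
  have hget0 : ∀ (a b : List Int), PySem.List.pyGetD [a, b] (0 : Int) [] = a := fun a b => rfl
  have hget1 : ∀ (a b : List Int), PySem.List.pyGetD [a, b] (1 : Int) [] = b := fun a b => rfl
  rw [hget0, hget1]
  simp only [List.length_map, PySem.List.length_pyRange_one, Int.sub_zero, Int.toNat_natCast]
  simp only [List.append_assoc, List.singleton_append]
  rw [PySem.List.foldl_append_eq_flatMap, PySem.List.foldl_append_eq_flatMap]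
  rw [List.nil_append, List.nil_append]
  rw [List.flatMap_def, List.map_congr_left (g := fun j =>
        [pvAt (PySem.Int.mod (0 + 58 * PySem.List.pyGetD x0 j 0 + -87 * PySem.List.pyGetD x1 j 0) 36),
         pvAt (PySem.Int.mod (0 + -29 * PySem.List.pyGetD x0 j 0 + 116 * PySem.List.pyGetD x1 j 0) 36)])
      (by
        intro j hj
        rw [PySem.List.mem_pyRange_one] at hj
        rw [PySem.List.pyGetD_map_pyRange_of_nonneg _ _ _ _ hj.1 hj.2,
            PySem.List.pyGetD_map_pyRange_of_nonneg _ _ _ _ hj.1 hj.2]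
        simp [Function.comp]), ← List.flatMap_def]
  rw [pvFlat (fun a b => pvAt (PySem.Int.mod (0 + 58 * a + -87 * b) 36))
             (fun a b => pvAt (PySem.Int.mod (0 + -29 * a + 116 * b) 36)) x0 x1 hlen]
  rw [pvPairs_eq_zip, hx0, hx1, List.zip_map, List.flatMap_map]
  congr 1
  funext q
  simp [Prod.map]
  congr 2

theorem pv_main (palavra : String) : descriptografia palavra = descriptografia_alt palavra := by
  have hmodn : PySem.Int.mod ((palavra.toList.length : Nat) : Int) 2
      = ((palavra.toList.length % 2 : Nat) : Int) := by
    exact_mod_cast PySem.Int.mod_natCast palavra.toList.length 2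
  by_cases hodd : palavra.toList.length % 2 = 1
  · have hA : (PySem.Int.mod ((palavra.toList.length : Nat) : Int) 2 == 1) = true := by
      rw [hmodn, hodd]; rfl
    have hB : (palavra.toList.length % 2 == 1) = true := by rw [hodd]; rfl
    have hev : (palavra.toList.dropLast).length % 2 = 0 := by
      rw [List.length_dropLast]; omega
    have hff : (false == false) = true := rfl
    simp only [descriptografia, descriptografia_alt, hA, hB, if_true, hff,
      PySem.List.slice_to_neg_one]
    rw [pvCore _ hev]
  · have h0 : palavra.toList.length % 2 = 0 := by omega
    have hA : (PySem.Int.mod ((palavra.toList.length : Nat) : Int) 2 == 1) = false := by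
      rw [hmodn, h0]; rfl
    have hB : (palavra.toList.length % 2 == 1) = false := by rw [h0]; rfl
    have htf : (true == false) = false := rfl
    simp only [descriptografia, descriptografia_alt, hA, hB, if_false, htf,
      Bool.false_eq_true]
    rw [pvCore _ h0]

-- ===== VERDICT (by name: the statement is the Claim_ definition above) =====
theorem descriptografia_spec : Claim_equal_descriptografia := by
  intro palavra _ _
  exact pv_main palavra
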